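-- pv_equiv track=rewrite | github.com/pypi-data/pypi-mirror-383 | packages/skip-trace/skip_trace-0.1.0.tar.gz/skip_trace-0.1.0/skip_trace/collectors/whois.py | _normalize_org_name
-- ===== SOURCE A (Python) =====
-- from typing import Any, Dict, List, Optional
--
-- def _normalize_org_name(name: Optional[str]) -> Optional[str]:
--     """Cleans up organization names from WHOIS/RDAP data."""
--     if not isinstance(name, str):
--         return None
--     name = name.strip()
--     common_suffixes = [
--         "LLC",
--         "L.L.C.",
--         "INC",
--         "INCORPORATED",
--         "CORP",
--         "CORPORATION",
--         "LTD",
--         "LIMITED",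
--         "GMBH",
--         "S.A.",
--         "S.L.",
--     ]
--     up = name.upper()
--     for suf in common_suffixes:
--         suf_dot = f"{suf}."
--         if up.endswith(f" {suf}") or up.endswith(f",{suf}"):
--             name = name[: -(len(suf) + 1)].strip().rstrip(",")
--             break
--         if up.endswith(f" {suf_dot}") or up.endswith(f",{suf_dot}"):
--             name = name[: -(len(suf_dot) + 1)].strip().rstrip(",")
--             break
--     return name.title()
-- ===== SOURCE B (Python) =====
-- from typing import Optional
--
-- _SUFFIXES = frozenset(
--     s
--     for base in "LLC L.L.C. INC INCORPORATED CORP CORPORATION LTD LIMITED GMBH S.A. S.L.".split()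
--     for s in (base, base + ".")
-- )
--
-- def _normalize_org_name(name: Optional[str]) -> Optional[str]:
--     """Cleans up organization names from WHOIS/RDAP data."""
--     if not isinstance(name, str):
--         return None
--     name = name.strip()
--     # the only candidate suffix is whatever follows the last separator:
--     # find it with rfind and look it up once in a precomputed set
--     cut = max(name.rfind(" "), name.rfind(","))
--     if cut != -1 and name[cut + 1:].upper() in _SUFFIXES:
--         name = name[:cut].strip().rstrip(",")
--     return name.title()
-- ===== Notes on version B (the rewrite author's own statement) =====
-- stated objective: alternative
-- what changed: Instead of A's loop over eleven suffixes with four endswith checks each, B locates the last separator once with rfind and looks the uppercased tail up in a precomputed frozenset of all suffix variants.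
import Mathlib
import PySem

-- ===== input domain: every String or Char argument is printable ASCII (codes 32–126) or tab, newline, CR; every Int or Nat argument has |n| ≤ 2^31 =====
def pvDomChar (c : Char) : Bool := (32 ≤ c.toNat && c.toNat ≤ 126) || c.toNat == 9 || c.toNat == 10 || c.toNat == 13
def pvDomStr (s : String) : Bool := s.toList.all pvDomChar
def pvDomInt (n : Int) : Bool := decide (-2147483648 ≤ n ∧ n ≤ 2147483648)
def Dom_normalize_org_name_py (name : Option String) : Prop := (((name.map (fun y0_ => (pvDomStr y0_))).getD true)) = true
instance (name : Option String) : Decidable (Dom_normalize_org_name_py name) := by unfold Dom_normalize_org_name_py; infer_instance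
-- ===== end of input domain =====

-- B replaces A's scan over eleven endswith-checked suffixes by one rfind for the last
-- separator plus a single lookup of the tail in a precomputed set (objective: alternative).


-- hand port of s.rstrip(","): drop trailing ',' characters (PySem has no one-sided
-- strip-with-chars); exact for a single-character strip set; shared by both ports
def pyRstripComma (s : List Char) : List Char :=
  (s.reverse.dropWhile (fun c => c == ',')).reverse

-- ===== PORT A =====
-- hand port of str.title() as A calls it: on the printable-ASCII domain 'cased' = 'alpha',
-- so a letter is uppercased iff the previous character is not a letter; exact there
def pyTitleChars : List Char → Bool → List Char
  | [], _ => []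
  | c :: cs, prevAlpha =>
    (if PySem.Chars.isalpha c then
      (if prevAlpha then PySem.Chars.lowerChar c else PySem.Chars.upperChar c)
     else c) :: pyTitleChars cs (PySem.Chars.isalpha c)

def pvSufList : List (List Char) :=
  [['L', 'L', 'C'], ['L', '.', 'L', '.', 'C', '.'], ['I', 'N', 'C'], ['I', 'N', 'C', 'O', 'R', 'P', 'O', 'R', 'A', 'T', 'E', 'D'], ['C', 'O', 'R', 'P'],
   ['C', 'O', 'R', 'P', 'O', 'R', 'A', 'T', 'I', 'O', 'N'], ['L', 'T', 'D'], ['L', 'I', 'M', 'I', 'T', 'E', 'D'], ['G', 'M', 'B', 'H'], ['S', '.', 'A', '.'],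
   ['S', '.', 'L', '.']]

-- the for-loop with break: first matching suffix wins; name[:-(k+1)] is a negative slice
def normA_loop (nameC up : List Char) : List (List Char) → List Char
  | [] => nameC
  | suf :: rest =>
    if PySem.Chars.endswith up (' ' :: suf) || PySem.Chars.endswith up (',' :: suf) then
      pyRstripComma (PySem.Chars.strip
        (PySem.List.slice nameC none (some (-((suf.length + 1 : Nat) : Int)))))
    else
      let sufd := suf ++ ['.']
      if PySem.Chars.endswith up (' ' :: sufd) || PySem.Chars.endswith up (',' :: sufd) then
        pyRstripComma (PySem.Chars.strip
          (PySem.List.slice nameC none (some (-((sufd.length + 1 : Nat) : Int)))))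
      else normA_loop nameC up rest

def normalize_org_name_py (name : Option String) : Option String :=
  match name with
  | none => none
  | some s0 =>
    let nameC := PySem.Chars.strip s0.toList
    let up := PySem.Chars.upper nameC
    some (String.ofList (pyTitleChars (normA_loop nameC up pvSufList) false))

-- ===== PORT B =====
-- Source B's module-level frozenset, built the way Source B builds it: split one string on
-- whitespace and add the dotted variant of every base
def pvSuffixSet : PySem.Set (List Char) :=
  PySem.Set.ofList
    ((PySem.Chars.split₀
        "LLC L.L.C. INC INCORPORATED CORP CORPORATION LTD LIMITED GMBH S.A. S.L.".toList).flatMap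
      (fun b => [b, b ++ ['.']]))

-- port of Source B's .title() library call: one left fold carrying (reversed output so far,
-- previous char is a letter); exact on the printable-ASCII domain where 'cased' = 'alpha'
def titleFold (s : List Char) : List Char :=
  (s.foldl
    (fun (st : List Char × Bool) c =>
      ((if PySem.Chars.isalpha c then
          (if st.2 then PySem.Chars.lowerChar c else PySem.Chars.upperChar c)
        else c) :: st.1,
       PySem.Chars.isalpha c))
    ([], false)).1.reverse

def normalize_org_name_py_alt (name : Option String) : Option String :=
  name.map (fun s0 =>
    let nameC := PySem.Chars.strip s0.toList
    -- cut = max(name.rfind(" "), name.rfind(",")): index of the last separator, -1 if none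
    let cut := max (PySem.Chars.rfind nameC [' ']) (PySem.Chars.rfind nameC [','])
    let res :=
      if cut ≠ -1 ∧ PySem.Set.contains pvSuffixSet
          (PySem.Chars.upper (PySem.List.slice nameC (some (cut + 1)) none)) = true then
        pyRstripComma (PySem.Chars.strip (PySem.List.slice nameC none (some cut)))
      else nameC
    String.ofList (titleFold res))

-- ===== PRECONDITION & SPEC =====
def Spec_normalize_org_name_py (name : Option String) (out : Option String) : Prop := out = normalize_org_name_py_alt name
instance (name : Option String) (out : Option String) : Decidable (Spec_normalize_org_name_py name out) := by unfold Spec_normalize_org_name_py; infer_instance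

-- ===== CLAIM (what is proved, stated in full; the proofs are below) =====
def Claim_equal_normalize_org_name_py : Prop := ∀ (name : Option String), Dom_normalize_org_name_py name → Spec_normalize_org_name_py name (normalize_org_name_py name)

-- ===== LEMMAS AND PROOFS =====

-- proof-only device: the position just after the last separator (space/comma) in s,
-- 0 if there is none; both ports' behaviour is characterised through it
def scanBack (s : List Char) : Nat → Nat
  | 0 => 0
  | i + 1 => if s[i]? == some ' ' || s[i]? == some ',' then i + 1 else scanBack s i

-- uppercasing maps ' ' and ',' to themselves and nothing else to them
lemma upperChar_sep_iff (c : Char) :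
    (PySem.Chars.upperChar c = ' ' ∨ PySem.Chars.upperChar c = ',') ↔ (c = ' ' ∨ c = ',') := by
  unfold PySem.Chars.upperChar
  split
  · rename_i h
    have h1 : 97 ≤ c.toNat ∧ c.toNat ≤ 122 := by
      simp [PySem.Chars.islower] at h
      exact ⟨h.1, h.2⟩
    have h32 : (' ' : Char).toNat = 32 := rfl
    have h44 : (',' : Char).toNat = 44 := rfl
    have hv : Nat.isValidChar (c.toNat - 32) := Or.inl (by omega)
    constructor
    · intro h2
      exfalso
      rcases h2 with h2 | h2 <;>
      · have h3 := congrArg Char.toNat h2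
        rw [Char.toNat_ofNat, if_pos hv] at h3
        omega
    · intro h2
      exfalso
      rcases h2 with h2 | h2 <;> subst h2 <;> revert h1 <;> decide
  · exact Iff.rfl

lemma scanBack_le (s : List Char) (k : Nat) : scanBack s k ≤ k := by
  induction k with
  | zero => simp [scanBack]
  | succ i ih => unfold scanBack; split <;> omega

lemma scanBack_sep (s : List Char) (k : Nat) (h : 0 < scanBack s k) :
    s[scanBack s k - 1]? = some ' ' ∨ s[scanBack s k - 1]? = some ',' := by
  induction k with
  | zero => simp [scanBack] at h
  | succ i ih =>
    unfold scanBack at h ⊢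
    split
    · rename_i hc
      simp only [Nat.add_sub_cancel]
      rcases Bool.or_eq_true .. |>.mp hc with hc | hc
      · exact Or.inl (by simpa using hc)
      · exact Or.inr (by simpa using hc)
    · rename_i hc
      rw [if_neg hc] at h
      exact ih h

lemma scanBack_no_sep (s : List Char) (k : Nat) :
    ∀ j, scanBack s k ≤ j → j < k → ¬(s[j]? = some ' ' ∨ s[j]? = some ',') := by
  induction k with
  | zero => omega
  | succ i ih =>
    intro j h1 h2
    unfold scanBack at h1
    split at h1
    · omega
    · rename_i hc
      rcases Nat.lt_succ_iff_lt_or_eq.mp h2 with h2 | h2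
      · exact ih j h1 h2
      · subst h2
        intro hj
        apply hc
        rcases hj with hj | hj <;> simp [hj]

-- A's endswith test for a separator-free suffix t fires exactly when the tail after the
-- last separator uppercases to t
lemma endswith_iff_tail (s t : List Char) (ht : t ≠ [])
    (hns : ∀ c ∈ t, ¬(c = ' ' ∨ c = ',')) :
    ((' ' :: t) <:+ PySem.Chars.upper s ∨ (',' :: t) <:+ PySem.Chars.upper s) ↔
      (0 < scanBack s s.length ∧ PySem.Chars.upper (s.drop (scanBack s s.length)) = t) := by
  have hu : PySem.Chars.upper = fun l => l.map PySem.Chars.upperChar := rfl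
  set n := s.length with hn
  set i := scanBack s n with hi
  have hile : i ≤ n := scanBack_le s n
  constructor
  · intro hsuf
    obtain ⟨c, hc, hcs⟩ : ∃ c, (c = ' ' ∨ c = ',') ∧ (c :: t) <:+ PySem.Chars.upper s := by
      rcases hsuf with h | h
      · exact ⟨' ', Or.inl rfl, h⟩
      · exact ⟨',', Or.inr rfl, h⟩
    set m := t.length + 1 with hm
    have hsd : (PySem.Chars.upper s).length = n := by simp [hu, hn]
    have hdrop : c :: t = (PySem.Chars.upper s).drop (n - m) := by
      have := List.suffix_iff_eq_drop.mp hcs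
      rw [hsd] at this
      simpa [hm] using this
    have hlen : m ≤ n := by
      have := congrArg List.length hdrop
      simp [hu] at this
      omega
    have hdm : s.drop (n - m) = s[n - m]'(by omega) :: s.drop (n - m + 1) :=
      List.drop_eq_getElem_cons (by omega)
    have hmap : (PySem.Chars.upper s).drop (n - m) =
        PySem.Chars.upperChar (s[n - m]'(by omega)) :: PySem.Chars.upper (s.drop (n - m + 1)) := by
      rw [hu]
      simp only [← List.map_drop, hdm, List.map_cons]
    rw [hmap] at hdrop
    have hch : PySem.Chars.upperChar (s[n - m]'(by omega)) = c := ((List.cons.injEq ..).mp hdrop.symm).1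
    have htl : PySem.Chars.upper (s.drop (n - m + 1)) = t := ((List.cons.injEq ..).mp hdrop.symm).2
    have hsep : s[n - m]? = some ' ' ∨ s[n - m]? = some ',' := by
      have hv : (s[n - m]'(by omega) = ' ' ∨ s[n - m]'(by omega) = ',') := by
        apply (upperChar_sep_iff _).mp
        rw [hch]; exact hc
      have hgl : s[n - m]? = some (s[n - m]'(by omega)) := List.getElem?_eq_getElem (by omega)
      rcases hv with h | h <;> [exact Or.inl (by rw [hgl, h]); exact Or.inr (by rw [hgl, h])]
    have hgt : n - m < i := by
      by_contra hle
      exact scanBack_no_sep s n (n - m) (by omega) (by omega) hsep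
    have hlt : i ≤ n - m + 1 := by
      by_contra hgt2
      have hsep2 := scanBack_sep s n (by omega)
      have hidx : i - 1 - (n - m + 1) < t.length := by omega
      have hmem : t[i - 1 - (n - m + 1)]'hidx ∈ t := List.getElem_mem hidx
      have hsepc := hns _ hmem
      have hlend : (s.drop (n - m + 1)).length = t.length := by
        have := congrArg List.length htl
        simpa [hu] using this
      have hix2 : i - 1 - (n - m + 1) < (s.drop (n - m + 1)).length := by omega
      have hchar : PySem.Chars.upperChar ((s.drop (n - m + 1))[i - 1 - (n - m + 1)]'hix2) =
          t[i - 1 - (n - m + 1)]'hidx := by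
        have h5 := congrArg (fun l => l[i - 1 - (n - m + 1)]?) htl
        simp only [hu] at h5
        rw [List.getElem?_map, List.getElem?_eq_getElem hix2, List.getElem?_eq_getElem hidx] at h5
        simpa using h5
      have hgetd : (s.drop (n - m + 1))[i - 1 - (n - m + 1)]'hix2 = s[i - 1]'(by omega) := by
        rw [List.getElem_drop]
        congr 1
        omega
      have hgl : s[i - 1]? = some (s[i - 1]'(by omega)) := List.getElem?_eq_getElem (by omega)
      have hv : s[i - 1]'(by omega) = ' ' ∨ s[i - 1]'(by omega) = ',' := by
        rcases hsep2 with h | h <;> rw [hgl] at h <;> injection h with h <;>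
          [exact Or.inl h; exact Or.inr h]
      apply hsepc
      have hfix : PySem.Chars.upperChar (s[i - 1]'(by omega)) = s[i - 1]'(by omega) := by
        rcases hv with h | h <;> rw [h] <;> rfl
      rw [← hchar, hgetd, hfix]
      exact hv
    have hieq : i = n - m + 1 := by omega
    refine ⟨by omega, ?_⟩
    rw [hieq]
    exact htl
  · rintro ⟨hpos, htail⟩
    have hlend : t.length = n - i := by
      have := congrArg List.length htail
      simp [hu] at this
      omega
    have hlt : i ≤ n - 1 := by
      have : t.length ≠ 0 := fun h => ht (List.length_eq_zero_iff.mp h)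
      omega
    obtain hsep := scanBack_sep s n hpos
    have hig : i - 1 < n := by omega
    have hgl : s[i - 1]? = some (s[i - 1]'hig) := List.getElem?_eq_getElem hig
    have hcs : s[i - 1]'hig = ' ' ∨ s[i - 1]'hig = ',' := by
      rcases hsep with h | h <;> rw [hgl] at h <;> injection h with h <;>
        [exact Or.inl h; exact Or.inr h]
    have hdropstep : s.drop (i - 1) = s[i - 1]'hig :: s.drop i := by
      have h6 := List.drop_eq_getElem_cons hig
      have h7 : i - 1 + 1 = i := by omega
      rw [h6, h7]
    have hkey : ((s[i - 1]'hig) :: t) <:+ PySem.Chars.upper s := by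
      apply List.suffix_iff_eq_drop.mpr
      have hul : (PySem.Chars.upper s).length = n := by simp [hu, hn]
      rw [hul]
      have hidx : n - ((s[i-1]'hig) :: t).length = i - 1 := by
        rw [List.length_cons, hlend]
        omega
      rw [hidx, hu]
      simp only [← List.map_drop, hdropstep, List.map_cons]
      have hfix : PySem.Chars.upperChar (s[i - 1]'hig) = s[i - 1]'hig := by
        rcases hcs with h | h <;> rw [h] <;> rfl
      rw [hfix]
      exact congrArg _ htail.symm
    rcases hcs with h | h
    · exact Or.inl (h ▸ hkey)
    · exact Or.inr (h ▸ hkey)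

-- the whole suffix loop, characterised through the last-separator position
lemma loopA_eq (s : List Char) (L : List (List Char))
    (hL : ∀ t ∈ L, t ≠ [] ∧ ∀ c ∈ t, ¬(c = ' ' ∨ c = ',')) :
    normA_loop s (PySem.Chars.upper s) L =
      if 0 < scanBack s s.length ∧ ∃ b ∈ L,
          (PySem.Chars.upper (s.drop (scanBack s s.length)) = b ∨
           PySem.Chars.upper (s.drop (scanBack s s.length)) = b ++ ['.'])
      then pyRstripComma (PySem.Chars.strip (s.take (scanBack s s.length - 1)))
      else s := by
  induction L with
  | nil => simp [normA_loop]
  | cons suf rest ih =>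
    obtain ⟨hne, hns⟩ := hL suf (by simp)
    have hned : suf ++ ['.'] ≠ [] := by simp
    have hnsd : ∀ c ∈ suf ++ ['.'], ¬(c = ' ' ∨ c = ',') := by
      intro c hc
      rcases List.mem_append.mp hc with h | h
      · exact hns c h
      · simp at h
        subst h
        simp
    set i := scanBack s s.length with hidef
    set T := PySem.Chars.upper (s.drop i) with hT
    have hile : i ≤ s.length := scanBack_le s s.length
    have h1 := endswith_iff_tail s suf hne hns
    have h2 := endswith_iff_tail s (suf ++ ['.']) hned hnsd
    have e1 : (PySem.Chars.endswith (PySem.Chars.upper s) (' ' :: suf) ||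
        PySem.Chars.endswith (PySem.Chars.upper s) (',' :: suf)) = true ↔ (0 < i ∧ T = suf) := by
      rw [Bool.or_eq_true, PySem.Chars.endswith_iff, PySem.Chars.endswith_iff]
      exact h1
    have e2 : (PySem.Chars.endswith (PySem.Chars.upper s) (' ' :: (suf ++ ['.'])) ||
        PySem.Chars.endswith (PySem.Chars.upper s) (',' :: (suf ++ ['.']))) = true ↔
        (0 < i ∧ T = suf ++ ['.']) := by
      rw [Bool.or_eq_true, PySem.Chars.endswith_iff, PySem.Chars.endswith_iff]
      exact h2
    have hlenT : T.length = s.length - i := by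
      rw [hT]
      show (List.map PySem.Chars.upperChar (s.drop i)).length = s.length - i
      simp
    unfold normA_loop
    by_cases hc1 : 0 < i ∧ T = suf
    · rw [if_pos (e1.mpr hc1)]
      have hsl : suf.length = s.length - i := by rw [← hc1.2]; exact hlenT
      rw [PySem.List.slice_to_neg_natCast s (suf.length + 1) (by omega)]
      have hidx : s.length - (suf.length + 1) = i - 1 := by omega
      rw [hidx, if_pos ⟨hc1.1, suf, by simp, Or.inl hc1.2⟩]
    · rw [if_neg (fun h => hc1 (e1.mp h))]
      by_cases hc2 : 0 < i ∧ T = suf ++ ['.']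
      · rw [if_pos (e2.mpr hc2)]
        have hsl : suf.length + 1 = s.length - i := by
          have := hc2.2
          have h9 : T.length = suf.length + 1 := by rw [this]; simp
          omega
        show pyRstripComma (PySem.Chars.strip
            (PySem.List.slice s none (some (-(((suf ++ ['.']).length + 1 : Nat) : Int))))) = _
        rw [PySem.List.slice_to_neg_natCast s ((suf ++ ['.']).length + 1) (by simp)]
        have hidx : s.length - ((suf ++ ['.']).length + 1) = i - 1 := by
          simp
          omega
        rw [hidx, if_pos ⟨hc2.1, suf, by simp, Or.inr hc2.2⟩]
      · rw [if_neg (fun h => hc2 (e2.mp h))]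
        rw [ih (fun t ht => hL t (List.mem_cons_of_mem _ ht))]
        have hiff : (0 < i ∧ ∃ b ∈ rest, (T = b ∨ T = b ++ ['.'])) ↔
            (0 < i ∧ ∃ b ∈ suf :: rest, (T = b ∨ T = b ++ ['.'])) := by
          constructor
          · rintro ⟨hp, b, hb, hq⟩
            exact ⟨hp, b, List.mem_cons_of_mem _ hb, hq⟩
          · rintro ⟨hp, b, hb, hq⟩
            rcases List.mem_cons.mp hb with hb | hb
            · subst hb
              rcases hq with hq | hq
              · exact absurd ⟨hp, hq⟩ hc1
              · exact absurd ⟨hp, hq⟩ hc2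
            · exact ⟨hp, b, hb, hq⟩
        rw [if_congr hiff rfl rfl]

-- B's fold-based title equals A's structural-recursion title
lemma titleFold_go (s : List Char) : ∀ (acc : List Char) (p : Bool),
    (s.foldl
      (fun (st : List Char × Bool) c =>
        ((if PySem.Chars.isalpha c then
            (if st.2 then PySem.Chars.lowerChar c else PySem.Chars.upperChar c)
          else c) :: st.1,
         PySem.Chars.isalpha c))
      (acc, p)).1.reverse = acc.reverse ++ pyTitleChars s p := by
  induction s with
  | nil => intro acc p; simp [pyTitleChars]
  | cons c cs ih =>
    intro acc p
    simp only [List.foldl_cons, pyTitleChars, ih, List.reverse_cons, List.append_assoc,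
      List.singleton_append]

lemma titleFold_eq (s : List Char) : titleFold s = pyTitleChars s false := by
  unfold titleFold
  rw [titleFold_go s [] false]
  simp

-- rfind.go never exceeds its start index
lemma rfind_go_le (s sub : List Char) (k : Nat) : PySem.Chars.rfind.go s sub k ≤ (k : Int) := by
  induction k with
  | zero => unfold PySem.Chars.rfind.go; split <;> simp
  | succ j ih =>
    unfold PySem.Chars.rfind.go
    split
    · simp
    · exact le_trans ih (by push_cast; omega)

lemma singleton_isPrefixOf (c : Char) (l : List Char) :
    [c].isPrefixOf l = (l[0]? == some c) := by
  cases l with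
  | nil => simp [List.isPrefixOf]
  | cons x xs =>
    show (c == x && List.isPrefixOf [] xs) = (some x == some c)
    simp [eq_comm]

-- the maximum of the two single-character rfind scans is the last-separator position − 1
lemma max_go_eq_scanBack (s : List Char) (k : Nat) :
    max (PySem.Chars.rfind.go s [' '] k) (PySem.Chars.rfind.go s [','] k) =
      (scanBack s (k + 1) : Int) - 1 := by
  induction k with
  | zero =>
    have hz : ∀ c : Char, PySem.Chars.rfind.go s [c] 0 = if s[0]? = some c then 0 else -1 := by
      intro c
      conv_lhs => unfold PySem.Chars.rfind.go
      rw [singleton_isPrefixOf]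
      by_cases h : s[0]? = some c <;> simp [h]
    rw [hz, hz]
    by_cases h1 : s[0]? = some ' '
    · have h2 : ¬ s[0]? = some ',' := by rw [h1]; simp
      simp [scanBack, h1]
    · by_cases h2 : s[0]? = some ','
      · simp [scanBack, h2]
      · simp [scanBack, h1, h2]
  | succ j ih =>
    have hg : ∀ c : Char, PySem.Chars.rfind.go s [c] (j + 1) =
        if s[j + 1]? = some c then ((j : Int) + 1) else PySem.Chars.rfind.go s [c] j := by
      intro c
      conv_lhs => unfold PySem.Chars.rfind.go
      rw [singleton_isPrefixOf]
      have : (s.drop (j + 1))[0]? = s[j + 1]? := by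
        rw [List.getElem?_drop]
      rw [this]
      by_cases h : s[j + 1]? = some c
      · simp [h]
      · simp [h]
    rw [hg, hg]
    have hsb : scanBack s (j + 1 + 1) =
        if s[j + 1]? == some ' ' || s[j + 1]? == some ',' then j + 1 + 1 else scanBack s (j + 1) := by
      conv_lhs => unfold scanBack
    have hle1 := rfind_go_le s [' '] j
    have hle2 := rfind_go_le s [','] j
    by_cases h1 : s[j + 1]? = some ' '
    · have h2 : ¬ s[j + 1]? = some ',' := by rw [h1]; simp
      rw [if_pos h1, if_neg h2, hsb]
      have hb : (s[j + 1]? == some ' ' || s[j + 1]? == some ',') = true := by simp [h1]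
      rw [hb, if_pos rfl, max_eq_left (hle2.trans (by omega))]
      push_cast
      ring
    · by_cases h2 : s[j + 1]? = some ','
      · rw [if_neg h1, if_pos h2, hsb]
        have hb : (s[j + 1]? == some ' ' || s[j + 1]? == some ',') = true := by simp [h2]
        rw [hb, if_pos rfl, max_eq_right (hle1.trans (by omega))]
        push_cast
        ring
      · rw [if_neg h1, if_neg h2, hsb]
        have hb1 : (s[j + 1]? == some ' ') = false := by simp [h1]
        have hb2 : (s[j + 1]? == some ',') = false := by simp [h2]
        rw [hb1, hb2]
        simp only [Bool.or_false]
        exact ih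

set_option maxHeartbeats 2000000 in
lemma split_eq_pvSufList : PySem.Chars.split₀
    "LLC L.L.C. INC INCORPORATED CORP CORPORATION LTD LIMITED GMBH S.A. S.L.".toList =
    pvSufList := by decide

lemma scanBack_stable (s : List Char) (k : Nat) (h : s.length ≤ k) :
    scanBack s (k + 1) = scanBack s k := by
  have hn : s[k]? = none := by
    rw [List.getElem?_eq_none_iff]
    exact h
  conv_lhs => unfold scanBack
  rw [hn]
  simp

-- the top-level rfind bridge: cut = last-separator position − 1
lemma max_rfind_eq (s : List Char) :
    max (PySem.Chars.rfind s [' ']) (PySem.Chars.rfind s [',']) =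
      (scanBack s s.length : Int) - 1 := by
  show max (PySem.Chars.rfind.go s [' '] s.length) (PySem.Chars.rfind.go s [','] s.length) = _
  rw [max_go_eq_scanBack, scanBack_stable s s.length (le_refl _)]

-- ===== VERDICT (by name: the statement is the Claim_ definition above) =====
set_option maxHeartbeats 2000000 in
theorem normalize_org_name_py_spec : Claim_equal_normalize_org_name_py := by
  intro name _
  unfold Spec_normalize_org_name_py
  cases name with
  | none => rfl
  | some s0 =>
    simp only [normalize_org_name_py, normalize_org_name_py_alt, Option.map_some]
    congr 1
    congr 1
    rw [titleFold_eq]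
    congr 1
    set s := PySem.Chars.strip s0.toList with hs
    set i := scanBack s s.length with hidef
    have hmem : ∀ T : List Char, PySem.Set.contains pvSuffixSet T = true ↔
        ∃ b ∈ pvSufList, (T = b ∨ T = b ++ ['.']) := by
      intro T
      unfold pvSuffixSet
      rw [split_eq_pvSufList]
      rw [show (PySem.Set.contains = fun (s : PySem.Set (List Char)) x => List.contains s x) from rfl]
      rw [List.contains_iff_mem, PySem.Set.mem_ofList, List.mem_flatMap]
      constructor
      · rintro ⟨b, hb, hq⟩
        simp only [List.mem_cons, List.not_mem_nil, or_false] at hq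
        exact ⟨b, hb, hq⟩
      · rintro ⟨b, hb, hq⟩
        refine ⟨b, hb, ?_⟩
        simp only [List.mem_cons, List.not_mem_nil, or_false]
        exact hq
    have hLpf : ∀ t ∈ pvSufList, t ≠ [] ∧ ∀ c ∈ t, ¬(c = ' ' ∨ c = ',') := by
      intro t ht
      unfold pvSufList at ht
      simp only [List.mem_cons, List.not_mem_nil, or_false] at ht
      rcases ht with h | h | h | h | h | h | h | h | h | h | h <;> subst h <;>
        exact ⟨by decide, by intro c hc; fin_cases hc <;> decide⟩
    rw [loopA_eq s pvSufList hLpf, max_rfind_eq, ← hidef]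
    by_cases hpos : 0 < i
    · rw [show ((i : Int) - 1 + 1) = (i : Int) from by ring,
        PySem.List.slice_from_natCast,
        show ((i : Int) - 1) = ((i - 1 : Nat) : Int) from by omega,
        PySem.List.slice_to_natCast]
      refine if_congr ?_ rfl rfl
      constructor
      · rintro ⟨h1, h2⟩
        exact ⟨by omega, (hmem _).mpr h2⟩
      · rintro ⟨h1, h2⟩
        exact ⟨hpos, (hmem _).mp h2⟩
    · have hi0 : i = 0 := by omega
      rw [if_neg (fun h => hpos h.1), if_neg]
      rintro ⟨h1, _⟩
      apply h1
      rw [hi0]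
      simp
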